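-- pv_equiv track=rewrite | github.com/Massey-7-Wonders-project-team/Massey_Project_7_Wonders | application/controllers/card_logic.py | get_best_RA_combo
-- ===== SOURCE A (Python) =====
-- def get_best_RA_combo(c, list_cards, basic=True):
--     """
--     Assumes no RA cards have both basic and advanced resources.
--     Without considering combinations of both left and right players' RA cards, it is technically possible to
--     return a non-optimal solution, but should happen so infrequently as to not be worth doing. Monitor and change
--     if it happens a noticeable amount of times.
--     :param c: A 7 element list of what is needed
--     :param list_cards: A list of 7 element lists specifying possible combinations
--     :param basic: If true, returns the best combination of basic resources, otherwise of advanced resources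
--     :return: Returns best 7 element list
--     """
--     if not list_cards:
--         return None
--     if basic:
--         usage = [sum([a if a < b else b for (a, b) in zip(x[0:4], c[0:4])]) for x in list_cards]
--         best_index = usage.index(max(usage))
--     else:
--         usage = [sum([a if a < b else b for (a, b) in zip(x[4:], c[4:])]) for x in list_cards]
--         best_index = usage.index(max(usage))
--
--     return list_cards[best_index]
-- ===== SOURCE B (Python) =====
-- def get_best_RA_combo(c, list_cards, basic=True):
--     """Divide-and-conquer tournament: recursively find the best of each half and
--     compare; strict '<' prefers the left half on ties, so the first maximum wins."""
--     if basic: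
--         lo, hi = 0, 4
--     else:
--         lo, hi = 4, None
--     need = c[lo:hi]
--
--     def score(x):
--         return sum(min(a, b) for a, b in zip(x[lo:hi], need))
--
--     def tournament(cards):
--         if not cards:
--             return None
--         if len(cards) == 1:
--             return cards[0]
--         mid = len(cards) // 2
--         left = tournament(cards[:mid])
--         right = tournament(cards[mid:])
--         return right if score(left) < score(right) else left
--
--     return tournament(list_cards)
-- ===== Notes on version B (the rewrite author's own statement) =====
-- stated objective: alternative
-- what changed: Replaces A's staged argmax (build a full usage list, then index(max(usage))) with a recursive divide-and-conquer tournament that splits list_cards in halves, recursively picks each half's champion and compares them with strict '<' so the left (earlier) half wins ties, reproducing the first-maximum rule.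
import Mathlib
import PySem

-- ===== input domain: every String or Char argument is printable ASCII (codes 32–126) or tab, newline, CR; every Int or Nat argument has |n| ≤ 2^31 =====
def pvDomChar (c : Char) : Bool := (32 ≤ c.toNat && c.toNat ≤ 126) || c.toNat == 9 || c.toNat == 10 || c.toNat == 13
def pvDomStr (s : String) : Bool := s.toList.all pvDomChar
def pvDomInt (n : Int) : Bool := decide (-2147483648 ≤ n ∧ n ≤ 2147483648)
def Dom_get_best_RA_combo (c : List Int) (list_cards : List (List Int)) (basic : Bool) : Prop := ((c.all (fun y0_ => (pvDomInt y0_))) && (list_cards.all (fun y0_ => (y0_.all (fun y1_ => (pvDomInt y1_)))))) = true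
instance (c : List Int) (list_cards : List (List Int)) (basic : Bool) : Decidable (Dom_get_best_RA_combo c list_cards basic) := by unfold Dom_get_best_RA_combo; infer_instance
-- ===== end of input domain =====

-- B replaces A's staged argmax (usage list + index(max)) with a recursive divide-and-conquer
-- tournament over halves; strict '<' prefers the left half, keeping the first-maximum rule
-- (objective: alternative algorithm; same return value).

-- ===== PORT A =====
def get_best_RA_combo (c : List Int) (list_cards : List (List Int)) (basic : Bool) : Option (List Int) :=
  if list_cards.isEmpty then none
  else
    let usage : List Int :=
      if basic then
        list_cards.map (fun x =>
          (((PySem.List.slice x (some 0) (some 4)).zip (PySem.List.slice c (some 0) (some 4))).map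
            (fun ab => if ab.1 < ab.2 then ab.1 else ab.2)).sum)
      else
        list_cards.map (fun x =>
          (((PySem.List.slice x (some 4) none).zip (PySem.List.slice c (some 4) none)).map
            (fun ab => if ab.1 < ab.2 then ab.1 else ab.2)).sum)
    match PySem.List.max? usage (fun y => y) with
    | none => none                 -- unreachable: usage nonempty
    | some m =>
      match PySem.List.index? usage m with
      | none => none               -- unreachable: m ∈ usage
      | some best_index => PySem.List.pyGet? list_cards (best_index : Int)

-- ===== PORT B =====
-- need = c[lo:hi]
def pvNeed (c : List Int) (basic : Bool) : List Int :=
  if basic then PySem.List.slice c (some 0) (some 4) else PySem.List.slice c (some 4) none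

-- score(x) = sum(min(a, b) for a, b in zip(x[lo:hi], need))
def pvScoreB (need : List Int) (basic : Bool) (x : List Int) : Int :=
  let sx := if basic then PySem.List.slice x (some 0) (some 4) else PySem.List.slice x (some 4) none
  ((sx.zip need).map (fun ab => min ab.1 ab.2)).sum

-- tournament(cards); cards[:mid] / cards[mid:] are ported as take/drop, exact since 0 ≤ mid ≤ len
def pvTour (f : List Int → Int) (cards : List (List Int)) : Option (List Int) :=
  if h : cards.length ≤ 1 then
    match cards with
    | [] => none
    | x :: _ => some x
  else
    -- mid = len(cards) // 2, inlined
    match pvTour f (cards.take (cards.length / 2)), pvTour f (cards.drop (cards.length / 2)) with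
    | some l, some r => if f l < f r then some r else some l
    | some l, none => some l       -- unreachable: both halves nonempty
    | none, r => r                 -- unreachable
termination_by cards.length
decreasing_by
  · simp only [List.length_take]; omega
  · simp only [List.length_drop]; omega

def get_best_RA_combo_alt (c : List Int) (list_cards : List (List Int)) (basic : Bool) : Option (List Int) :=
  pvTour (pvScoreB (pvNeed c basic) basic) list_cards

-- ===== PRECONDITION & SPEC =====
def Spec_get_best_RA_combo (c : List Int) (list_cards : List (List Int)) (basic : Bool) (out : Option (List Int)) : Prop := out = get_best_RA_combo_alt c list_cards basic
instance (c : List Int) (list_cards : List (List Int)) (basic : Bool) (out : Option (List Int)) : Decidable (Spec_get_best_RA_combo c list_cards basic out) := by unfold Spec_get_best_RA_combo; infer_instance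

-- ===== CLAIM (what is proved, stated in full; the proofs are below) =====
def Claim_equal_get_best_RA_combo : Prop := ∀ (c : List Int) (list_cards : List (List Int)) (basic : Bool), Dom_get_best_RA_combo c list_cards basic → Spec_get_best_RA_combo c list_cards basic (get_best_RA_combo c list_cards basic)

-- ===== LEMMAS AND PROOFS =====

-- first-argmax of f over a list (first element attaining the maximal key); proof-only helper
def pvFam (f : List Int → Int) : List (List Int) → Option (List Int)
  | [] => none
  | x :: xs =>
    match pvFam f xs with
    | none => some x
    | some y => if f x < f y then some y else some x

-- the combining step of the tournament, as a function on options
def pvMerge (f : List Int → Int) : Option (List Int) → Option (List Int) → Option (List Int)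
  | some a, some b => if f a < f b then some b else some a
  | some a, none => some a
  | none, r => r

theorem pvFam_cons (f : List Int → Int) (x : List Int) (xs : List (List Int)) :
    pvFam f (x :: xs) = pvMerge f (some x) (pvFam f xs) := by
  cases h : pvFam f xs <;> simp [pvFam, pvMerge, h]

theorem pvMerge_assoc (f : List Int → Int) (x : List Int)
    (p q : Option (List Int)) :
    pvMerge f (some x) (pvMerge f p q) = pvMerge f (pvMerge f (some x) p) q := by
  cases p with
  | none => cases q <;> rfl
  | some a =>
    cases q with
    | none => by_cases hxa : f x < f a <;> simp [pvMerge, hxa]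
    | some b =>
      by_cases hab : f a < f b
      · by_cases hxa : f x < f a
        · have hxb : f x < f b := lt_trans hxa hab
          simp [pvMerge, hab, hxa, hxb]
        · simp [pvMerge, hab, hxa]
      · by_cases hxa : f x < f a
        · simp [pvMerge, hab, hxa]
        · have hxb : ¬ f x < f b := by omega
          simp [pvMerge, hab, hxa, hxb]

theorem pvFam_append (f : List Int → Int) (l r : List (List Int)) :
    pvFam f (l ++ r) = pvMerge f (pvFam f l) (pvFam f r) := by
  induction l with
  | nil => cases h : pvFam f r <;> simp [pvFam, pvMerge, h]
  | cons x l' ih =>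
    rw [List.cons_append, pvFam_cons, ih, pvFam_cons, pvMerge_assoc]

theorem pvTour_eq_pvFam (f : List Int → Int) (n : ℕ) :
    ∀ xs : List (List Int), xs.length ≤ n → pvTour f xs = pvFam f xs := by
  induction n with
  | zero =>
    intro xs h
    have hx : xs = [] := List.eq_nil_of_length_eq_zero (Nat.le_zero.mp h)
    subst hx
    simp [pvTour, pvFam]
  | succ n ih =>
    intro xs h
    by_cases h1 : xs.length ≤ 1
    · cases xs with
      | nil => simp [pvTour, pvFam]
      | cons x t =>
        have ht : t = [] := by
          have : t.length = 0 := by simpa using h1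
          exact List.eq_nil_of_length_eq_zero this
        subst ht
        simp [pvTour, pvFam]
    · have h2 : 2 ≤ xs.length := by omega
      have hmid1 : 1 ≤ xs.length / 2 := by omega
      have hl : (xs.take (xs.length / 2)).length ≤ n := by
        simp only [List.length_take]; omega
      have hr : (xs.drop (xs.length / 2)).length ≤ n := by
        simp only [List.length_drop]; omega
      rw [pvTour, dif_neg h1]
      rw [ih _ hl, ih _ hr]
      conv_rhs => rw [← List.take_append_drop (xs.length / 2) xs, pvFam_append]
      cases pvFam f (xs.take (xs.length / 2)) <;>
        cases pvFam f (xs.drop (xs.length / 2)) <;> simp [pvMerge]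

theorem alt_eq_pvFam (c : List Int) (list_cards : List (List Int)) (basic : Bool) :
    get_best_RA_combo_alt c list_cards basic
      = pvFam (pvScoreB (pvNeed c basic) basic) list_cards :=
  pvTour_eq_pvFam _ list_cards.length list_cards le_rfl

theorem pvFam_mem (f : List Int → Int) (xs : List (List Int)) (y : List Int)
    (h : pvFam f xs = some y) : y ∈ xs := by
  induction xs generalizing y with
  | nil => simp [pvFam] at h
  | cons x t ih =>
    simp only [pvFam] at h
    cases ht : pvFam f t with
    | none =>
      rw [ht] at h
      change some x = some y at h
      simp only [Option.some.injEq] at h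
      exact h ▸ List.mem_cons_self
    | some z =>
      rw [ht] at h
      change (if f x < f z then some z else some x) = some y at h
      by_cases hxz : f x < f z
      · rw [if_pos hxz] at h
        simp only [Option.some.injEq] at h
        exact h ▸ List.mem_cons_of_mem _ (ih z ht)
      · rw [if_neg hxz] at h
        simp only [Option.some.injEq] at h
        exact h ▸ List.mem_cons_self

theorem pvFam_first (f : List Int → Int) (xs : List (List Int)) (k : ℕ) (hk : k < xs.length)
    (hfst : ∀ j (_ : j < k), f (xs[j]'(by omega)) < f (xs[k]'hk))
    (hmax : ∀ j (hj : j < xs.length), f (xs[j]'hj) ≤ f (xs[k]'hk)) :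
    pvFam f xs = some (xs[k]'hk) := by
  induction xs generalizing k with
  | nil => simp at hk
  | cons x t ih =>
    cases k with
    | zero =>
      cases ht : pvFam f t with
      | none => simp [pvFam, ht]
      | some y =>
        have hy : y ∈ t := pvFam_mem f t y ht
        obtain ⟨j, hj, rfl⟩ := List.mem_iff_getElem.mp hy
        have := hmax (j + 1) (by simpa using Nat.succ_lt_succ hj)
        simp only [List.getElem_cons_succ, List.getElem_cons_zero] at this
        simp [pvFam, ht, not_lt.mpr this]
    | succ k' =>
      have hk' : k' < t.length := by simpa using hk
      have ht : pvFam f t = some (t[k']'hk') := by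
        apply ih k' hk'
        · intro j hj
          have := hfst (j + 1) (by omega)
          simpa using this
        · intro j hj
          have := hmax (j + 1) (by simpa using Nat.succ_lt_succ hj)
          simpa using this
      have hx : f x < f (t[k']'hk') := by
        have := hfst 0 (by omega)
        simpa using this
      simp [pvFam, ht, hx]

-- A's per-card score equals B's per-card score
theorem scoreA_eq_scoreB (c : List Int) (basic : Bool) (x : List Int) :
    (if basic then
      (((PySem.List.slice x (some 0) (some 4)).zip (PySem.List.slice c (some 0) (some 4))).map
        (fun ab => if ab.1 < ab.2 then ab.1 else ab.2)).sum
     else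
      (((PySem.List.slice x (some 4) none).zip (PySem.List.slice c (some 4) none)).map
        (fun ab => if ab.1 < ab.2 then ab.1 else ab.2)).sum)
    = pvScoreB (pvNeed c basic) basic x := by
  have hmap : ∀ (l : List (Int × Int)),
      l.map (fun ab => if ab.1 < ab.2 then ab.1 else ab.2)
        = l.map (fun ab => min ab.1 ab.2) := by
    intro l
    apply List.map_congr_left
    intro ab _
    rcases ab with ⟨a, b⟩
    simp only [min_def]
    split_ifs <;> omega
  cases basic <;> simp [pvScoreB, pvNeed, hmap]

theorem A_eq_pvFam (c : List Int) (list_cards : List (List Int)) (basic : Bool) :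
    get_best_RA_combo c list_cards basic
      = pvFam (pvScoreB (pvNeed c basic) basic) list_cards := by
  cases list_cards with
  | nil => simp [get_best_RA_combo, pvFam]
  | cons x t =>
    unfold get_best_RA_combo
    simp only [List.isEmpty_cons, Bool.false_eq_true, if_false]
    have husage : (if basic then
        (x :: t).map (fun x =>
          (((PySem.List.slice x (some 0) (some 4)).zip (PySem.List.slice c (some 0) (some 4))).map
            (fun ab => if ab.1 < ab.2 then ab.1 else ab.2)).sum)
      else
        (x :: t).map (fun x =>
          (((PySem.List.slice x (some 4) none).zip (PySem.List.slice c (some 4) none)).map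
            (fun ab => if ab.1 < ab.2 then ab.1 else ab.2)).sum))
        = (x :: t).map (pvScoreB (pvNeed c basic) basic) := by
      cases basic
      · simp only [Bool.false_eq_true, if_false]
        exact List.map_congr_left (fun a _ => by simpa using scoreA_eq_scoreB c false a)
      · simp only [if_true]
        exact List.map_congr_left (fun a _ => by simpa using scoreA_eq_scoreB c true a)
    rw [husage]
    set f := pvScoreB (pvNeed c basic) basic with hf
    set xs := x :: t with hxs
    have hne : xs.map f ≠ [] := by simp [hxs]
    cases hmax : PySem.List.max? (xs.map f) (fun y => y) with
    | none => exact absurd ((PySem.List.max?_eq_none_iff _ _).mp hmax) hne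
    | some m =>
      have hmem : m ∈ xs.map f := PySem.List.max?_mem hmax
      cases hidx : PySem.List.index? (xs.map f) m with
      | none => exact absurd hmem ((PySem.List.index?_eq_none_iff _ _).mp hidx)
      | some k =>
        obtain ⟨hk, husk, hprev⟩ := PySem.List.getElem_of_index?_eq_some hidx
        have hklen : k < xs.length := by simpa using hk
        have hfk : f (xs[k]'hklen) = m := by
          simpa using husk
        have hmax' : ∀ j (hj : j < xs.length), f (xs[j]'hj) ≤ f (xs[k]'hklen) := by
          intro j hj
          have : f (xs[j]'hj) ∈ xs.map f := by
            exact List.mem_map.mpr ⟨xs[j]'hj, List.getElem_mem hj, rfl⟩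
          have := PySem.List.max?_isMax hmax _ this
          simpa [hfk] using this
        have hfst : ∀ j (hj : j < k), f (xs[j]'(by omega)) < f (xs[k]'hklen) := by
          intro j hj
          have hjlen : j < xs.length := by omega
          have hne' : (xs.map f)[j]'(by simpa using hjlen) ≠ m := hprev j hj
          have hne'' : f (xs[j]'hjlen) ≠ m := by simpa using hne'
          have hle := hmax' j hjlen
          rw [← hfk] at hne''
          exact lt_of_le_of_ne hle hne''
        have hget : PySem.List.pyGet? xs (k : Int) = some (xs[k]'hklen) := by
          rw [PySem.List.pyGet?_natCast, List.getElem?_eq_getElem hklen]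
        simp only [hidx]
        change PySem.List.pyGet? xs (k : Int) = pvFam f xs
        rw [hget, pvFam_first f xs k hklen hfst hmax']

-- ===== VERDICT (by name: the statement is the Claim_ definition above) =====
theorem get_best_RA_combo_spec : Claim_equal_get_best_RA_combo := by
  intro c list_cards basic _hdom
  unfold Spec_get_best_RA_combo
  rw [A_eq_pvFam, alt_eq_pvFam]
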